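-- pv_equiv track=rewrite | github.com/DaphneZadoraUCLL/coursematerial_2425 | 08-lists/12-assignment-make-teams/student.py | make_teams
-- ===== SOURCE A (Python) =====
-- def make_teams(participants, team_size):
--     if team_size <= 0:
--         return []
--
--     teams = []
--
--     i = 0
--     while i < len(participants):
--         team = []
--         for j in range(team_size):
--             if i < len(participants):
--                 team.append(participants[i])
--                 i += 1
--         teams.append(team)
--
--     if len(teams) > 1:
--         last_team = teams[-1]
--         if len(last_team) < team_size:
--             leftovers = teams.pop()
--             index = 0
--             for name in leftovers:
--                 teams[index].append(name)
--                 index += 1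
--                 if index >= len(teams):
--                     index = 0
--
--     return teams
-- ===== SOURCE B (Python) =====
-- def make_teams(participants, team_size):
--     if team_size <= 0:
--         return []
--     n = len(participants)
--     full, rem = divmod(n, team_size)
--     teams = [list(participants[k * team_size:(k + 1) * team_size]) for k in range(full)]
--     if rem:
--         leftover = list(participants[full * team_size:])
--         if full == 0:
--             return [leftover]
--         for idx, name in enumerate(leftover):
--             teams[idx % full].append(name)
--     return teams
-- ===== Notes on version B (the rewrite author's own statement) =====
-- stated objective: simpler
-- what changed: Replaces A's stateful while-loop chunk building (index i, inner guarded for-loop) and its mutable wraparound-index leftover redistribution with up-front divmod arithmetic, slice-built full teams, and a round-robin enumerate fold using idx % full.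
import Mathlib
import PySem

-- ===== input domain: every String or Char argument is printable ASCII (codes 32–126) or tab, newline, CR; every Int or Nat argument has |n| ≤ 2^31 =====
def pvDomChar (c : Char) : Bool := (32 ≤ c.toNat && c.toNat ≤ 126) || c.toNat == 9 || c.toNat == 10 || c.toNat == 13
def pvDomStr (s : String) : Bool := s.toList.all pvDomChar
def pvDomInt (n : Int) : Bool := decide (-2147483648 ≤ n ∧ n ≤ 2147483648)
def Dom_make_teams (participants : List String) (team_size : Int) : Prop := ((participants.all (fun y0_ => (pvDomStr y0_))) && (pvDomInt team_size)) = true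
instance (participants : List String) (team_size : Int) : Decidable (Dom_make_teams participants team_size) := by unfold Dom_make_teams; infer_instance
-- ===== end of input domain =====

-- B replaces A's stateful while/for chunking and index-wraparound redistribution with
-- divmod arithmetic, slicing and a round-robin `idx % full` fold (objective: simpler).

-- ===== PORT A =====
-- inner 'for j in range(team_size)' loop: fuel = team_size iterations; i stays ≥ 0 and
-- participants[i] is guarded by i < len, so List.getD is exact here.
def pvInnerA (ps : List String) (fuel : Nat) (i : Nat) (team : List String) :
    List String × Nat :=
  match fuel with
  | 0 => (team, i)
  | f + 1 =>
    if i < ps.length then pvInnerA ps f (i + 1) (team ++ [ps.getD i ""])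
    else pvInnerA ps f i team


-- outer 'while i < len(participants)' loop: each iteration advances i by at least 1
-- (team_size > 0 in this branch), so ps.length steps of fuel make the same computation total.
def pvOuterA (ps : List String) (ts : Nat) (fuel : Nat) (i : Nat)
    (teams : List (List String)) : List (List String) :=
  match fuel with
  | 0 => teams
  | f + 1 =>
    if i < ps.length then
      let r := pvInnerA ps ts i []
      pvOuterA ps ts f r.2 (teams ++ [r.1])
    else teams


-- one step of 'for name in leftovers': teams[index].append(name), then index wraparound
def pvRedistA (st : List (List String) × Nat) (name : String) :
    List (List String) × Nat :=
  let teams := st.1.modify st.2 (· ++ [name])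
  let index := st.2 + 1
  (teams, if index ≥ teams.length then 0 else index)


def make_teams (participants : List String) (team_size : Int) : List (List String) :=
  if team_size ≤ 0 then []
  else
    let teams := pvOuterA participants team_size.toNat participants.length 0 []
    if teams.length > 1 then
      let last_team := PySem.List.pyGetD teams (-1) []
      if (last_team.length : Int) < team_size then
        let leftovers := PySem.List.pyGetD teams (-1) []
        let rest := teams.dropLast
        (leftovers.foldl pvRedistA (rest, 0)).1
      else teams
    else teams


-- ===== PORT B =====
def make_teams_alt (participants : List String) (team_size : Int) : List (List String) :=
  if team_size ≤ 0 then []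
  else
    let n : Int := participants.length
    let full := PySem.Int.floordiv n team_size
    let rem := PySem.Int.mod n team_size
    let teams := (PySem.List.pyRange 0 full 1).map
      (fun k => PySem.List.slice participants (some (k * team_size)) (some ((k + 1) * team_size)))
    if rem ≠ 0 then
      let leftover := PySem.List.slice participants (some (full * team_size)) none
      if full = 0 then [leftover]
      else
        (PySem.List.enumerate leftover 0).foldl
          (fun t p => t.modify (PySem.Int.mod p.1 full).toNat (· ++ [p.2])) teams
    else teams


-- ===== PRECONDITION & SPEC =====
def Spec_make_teams (participants : List String) (team_size : Int) (out : List (List String)) : Prop := out = make_teams_alt participants team_size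
instance (participants : List String) (team_size : Int) (out : List (List String)) : Decidable (Spec_make_teams participants team_size out) := by unfold Spec_make_teams; infer_instance

-- ===== CLAIM (what is proved, stated in full; the proofs are below) =====
def Claim_equal_make_teams : Prop := ∀ (participants : List String) (team_size : Int), Dom_make_teams participants team_size → Spec_make_teams participants team_size (make_teams participants team_size)

-- ===== LEMMAS AND PROOFS =====

-- the chunk list A's while loop builds, as a structural recursion (proof device)
def pvChunks (l : List String) (ts : Nat) : List (List String) :=
  if h : l = [] ∨ ts = 0 then []
  else l.take ts :: pvChunks (l.drop ts) ts
termination_by l.length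
decreasing_by
  simp only [not_or] at h
  have h2 : ts ≠ 0 := h.2
  have h1 : l.length ≠ 0 := by simpa using h.1
  simp [List.length_drop]; omega


theorem pvInnerA_eq (ps : List String) (f : Nat) : ∀ (i : Nat) (team : List String),
    pvInnerA ps f i team =
      (team ++ (ps.drop i).take (min f (ps.length - i)), i + min f (ps.length - i)) := by
  induction f with
  | zero => intro i team; simp [pvInnerA]
  | succ f ih =>
    intro i team
    by_cases h : i < ps.length
    · have hmin : min (f + 1) (ps.length - i) = min f (ps.length - (i+1)) + 1 := by omega
      have hdrop : ps.drop i = ps[i] :: ps.drop (i+1) := (List.getElem_cons_drop h).symm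
      simp only [pvInnerA, if_pos h, ih, hmin, hdrop, List.take_succ_cons,
        List.getD_eq_getElem ps "" h, List.append_assoc, List.singleton_append]
      exact Prod.ext rfl (by omega)
    · have : min (f + 1) (ps.length - i) = 0 := by omega
      have h0 : min f (ps.length - i) = 0 := by omega
      simp [pvInnerA, if_neg h, ih, this, h0]


theorem pvOuterA_eq (ps : List String) (ts : Nat) (hts : 0 < ts) :
    ∀ (fuel i : Nat) (teams : List (List String)), ps.length - i ≤ fuel →
      pvOuterA ps ts fuel i teams = teams ++ pvChunks (ps.drop i) ts := by
  intro fuel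
  induction fuel with
  | zero =>
    intro i teams hf
    have : ps.drop i = [] := by
      apply List.drop_eq_nil_of_le; omega
    simp [pvOuterA, this, pvChunks]
  | succ f ih =>
    intro i teams hf
    by_cases h : i < ps.length
    · rw [pvOuterA, if_pos h, pvInnerA_eq]
      simp only
      rw [ih (i + min ts (ps.length - i)) _ (by omega)]
      rw [List.append_assoc]
      have hne : ¬ (ps.drop i = [] ∨ ts = 0) := by
        simp [List.drop_eq_nil_iff]
        omega
      conv_rhs => rw [pvChunks, dif_neg hne]
      have h1 : (ps.drop i).take ts = (ps.drop i).take (min ts (ps.length - i)) := by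
        rcases Nat.le_total ts (ps.length - i) with hle | hlt
        · rw [min_eq_left hle]
        · rw [min_eq_right hlt]
          rw [List.take_of_length_le (by simp; omega), List.take_of_length_le (by simp)]
      rw [List.drop_drop, h1]
      rcases Nat.le_total ts (ps.length - i) with hle | hlt
      · rw [min_eq_left hle]; simp [Nat.add_comm]
      · rw [min_eq_right hlt,
          List.drop_eq_nil_of_le (show ps.length ≤ i + (ps.length - i) by omega),
          List.drop_eq_nil_of_le (show ps.length ≤ i + ts by omega)]
        simp
    · have : ps.drop i = [] := by apply List.drop_eq_nil_of_le; omega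
      rw [pvOuterA, if_neg h]
      simp [this, pvChunks]


theorem pvChunks_eq (ts : Nat) (hts : 0 < ts) (l : List String) :
    pvChunks l ts = (List.range (l.length / ts)).map (fun k => (l.drop (k * ts)).take ts)
      ++ (if l.length % ts = 0 then [] else [l.drop (l.length / ts * ts)]) := by
  induction l using pvChunks.induct (ts := ts) with
  | case1 l h =>
    have hl : l = [] := h.resolve_right (by omega)
    subst hl
    simp [pvChunks]
  | case2 l h ih =>
    rw [pvChunks, dif_neg h]
    simp only [not_or] at h
    obtain ⟨hl, -⟩ := h
    have hlen : 0 < l.length := List.length_pos_of_ne_nil hl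
    rcases Nat.lt_or_ge l.length ts with hsmall | hbig
    · -- fewer than ts participants: single partial chunk
      have hd : l.drop ts = [] := List.drop_eq_nil_of_le (by omega)
      have hdiv : l.length / ts = 0 := Nat.div_eq_of_lt hsmall
      have hmod : l.length % ts = l.length := Nat.mod_eq_of_lt hsmall
      rw [hd, hdiv, hmod]
      simp [pvChunks, List.take_of_length_le (le_of_lt hsmall)]
      omega
    · -- at least one full chunk
      have hlen' : (l.drop ts).length = l.length - ts := by simp
      have hrepr : l.length = (l.length - ts) + ts := by omega
      have hdiv : l.length / ts = (l.length - ts) / ts + 1 := by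
        conv_lhs => rw [hrepr]
        exact Nat.add_div_right _ hts
      have hmod : l.length % ts = (l.length - ts) % ts := by
        conv_lhs => rw [hrepr]
        exact Nat.add_mod_right _ _
      rw [ih, hlen', hdiv, hmod, List.range_succ_eq_map]
      simp only [List.map_cons, List.map_map, Nat.zero_mul, List.drop_zero]
      rw [List.cons_append]
      congr 1
      congr 1
      · apply List.map_congr_left
        intro k _
        simp [Function.comp, List.drop_drop, Nat.succ_mul, Nat.add_comm, Nat.mul_comm]
      · rcases Nat.decEq ((l.length - ts) % ts) 0 with h0 | h0 <;> simp [h0, List.drop_drop]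
        congr 2
        rw [Nat.succ_mul]
        omega


theorem pvWrap_eq (c m : Nat) (hm : 0 < m) :
    (if c % m + 1 ≥ m then 0 else c % m + 1) = (c + 1) % m := by
  have key : (c + 1) % m = (c % m + 1) % m := by
    conv_rhs => rw [Nat.mod_add_mod]
  have hlt : c % m < m := Nat.mod_lt _ hm
  rcases Nat.lt_or_ge (c % m + 1) m with h1 | h1
  · rw [if_neg (by omega), key, Nat.mod_eq_of_lt h1]
  · have : c % m + 1 = m := by omega
    rw [if_pos h1, key, this, Nat.mod_self]


theorem pvRedist_eq (m : Nat) (hm : 0 < m) :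
    ∀ (lo : List String) (c : Nat) (teams : List (List String)), teams.length = m →
      (lo.foldl pvRedistA (teams, c % m)).1
        = (PySem.List.enumerate lo (c : Int)).foldl
            (fun t p => t.modify (PySem.Int.mod p.1 (m : Int)).toNat (· ++ [p.2])) teams := by
  intro lo
  induction lo with
  | nil => intro c teams hlen; simp [PySem.List.enumerate]
  | cons name rest ih =>
    intro c teams hlen
    rw [List.foldl_cons, PySem.List.enumerate_cons, List.foldl_cons]
    have hstep : pvRedistA (teams, c % m) name
        = (teams.modify (c % m) (· ++ [name]), (c + 1) % m) := by
      simp only [pvRedistA, List.length_modify, hlen]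
      rw [pvWrap_eq c m hm]
    have hint : (PySem.Int.mod ((c : Int)) ((m : Int))).toNat = c % m := by
      rw [PySem.Int.mod_eq_emod_of_pos (by exact_mod_cast hm), ← Int.natCast_mod,
        Int.toNat_natCast]
    rw [hstep, hint]
    have : ((c : Int) + 1) = ((c + 1 : Nat) : Int) := by push_cast; ring
    rw [this]
    exact ih (c + 1) _ (by simp [hlen])


theorem main_eq (ps : List String) (ts : Int) :
    make_teams ps ts = make_teams_alt ps ts := by
  by_cases hle : ts ≤ 0
  · simp [make_teams, make_teams_alt, hle]
  · have hpos : 0 < ts := by omega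
    set T : Nat := ts.toNat with hT
    have hcast : (T : Int) = ts := Int.toNat_of_nonneg (by omega)
    have hTpos : 0 < T := by omega
    set n : Nat := ps.length with hn
    -- A's chunk phase
    have hA : pvOuterA ps T n 0 [] = pvChunks ps T := by
      have := pvOuterA_eq ps T hTpos n 0 [] (by omega)
      simpa using this
    set F : List (List String) :=
      (List.range (n / T)).map (fun k => (ps.drop (k * T)).take T) with hF
    have hchunks : pvChunks ps T
        = F ++ (if n % T = 0 then [] else [ps.drop (n / T * T)]) :=
      pvChunks_eq T hTpos ps
    have hFlen : F.length = n / T := by simp [hF]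
    -- B's arithmetic
    have hfull : PySem.Int.floordiv (n : Int) ts = ((n / T : Nat) : Int) := by
      rw [← hcast]; exact PySem.Int.floordiv_natCast n T
    have hrem : PySem.Int.mod (n : Int) ts = ((n % T : Nat) : Int) := by
      rw [← hcast]; exact PySem.Int.mod_natCast n T
    -- B's full-team list is F
    have hBteams : (PySem.List.pyRange 0 ((n / T : Nat) : Int) 1).map
        (fun k => PySem.List.slice ps (some (k * ts)) (some ((k + 1) * ts))) = F := by
      rw [PySem.List.pyRange_one]
      simp only [Int.sub_zero, Int.toNat_natCast, List.map_map]
      apply List.map_congr_left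
      intro k hk
      simp only [Function.comp_apply, zero_add]
      have h1 : ((k : Int)) * ts = ((k * T : Nat) : Int) := by rw [← hcast]; push_cast; ring
      have h2 : ((k : Int) + 1) * ts = ((k * T : Nat) : Int) + ((T : Nat) : Int) := by
        rw [← hcast]; push_cast; ring
      rw [h1, h2, PySem.List.slice_natCast_add]
    have hFfull : ∀ L ∈ F, L.length = T := by
      intro L hL
      rw [hF] at hL
      obtain ⟨k, hk, rfl⟩ := List.mem_map.mp hL
      rw [List.mem_range] at hk
      have h1 : (k + 1) * T ≤ n / T * T := Nat.mul_le_mul_right T hk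
      have h2 : n / T * T ≤ n := Nat.div_mul_le_self n T
      have h3 : (k + 1) * T = k * T + T := Nat.succ_mul k T
      simp only [List.length_take, List.length_drop]
      rw [← hn]
      omega
    simp only [make_teams, make_teams_alt, if_neg hle]
    rw [hA, hchunks, hfull, hrem, hBteams]
    by_cases hr : n % T = 0
    · -- no leftovers
      rw [if_pos hr, List.append_nil,
        if_neg (show ¬ ((n % T : Nat) : Int) ≠ 0 by simp [hr])]
      by_cases hF1 : F.length > 1
      · rw [if_pos hF1]
        have hFne : F ≠ [] := by intro h; rw [h] at hF1; simp at hF1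
        rw [PySem.List.pyGetD_neg_one F [] hFne]
        have : (F.getLast hFne).length = T := hFfull _ (List.getLast_mem hFne)
        rw [this, hcast]
        simp
      · rw [if_neg hF1]
    · -- leftovers exist
      have hrInt : ((n % T : Nat) : Int) ≠ 0 := Nat.cast_ne_zero.mpr hr
      rw [if_neg hr, if_pos hrInt]
      by_cases hq : n / T = 0
      · -- no full team: single partial team
        have hF0 : F = [] := by simp [hF, hq]
        have hqInt : ((n / T : Nat) : Int) = 0 := by rw [hq]; rfl
        rw [if_pos hqInt, hF0, List.nil_append, hq, Nat.zero_mul, List.drop_zero]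
        rw [if_neg (show ¬ ([ps] : List (List String)).length > 1 by simp)]
        rw [Nat.cast_zero, zero_mul, PySem.List.slice_zero_start,
          PySem.List.slice_none_none]
      · -- full teams plus a partial one: round-robin redistribution
        have hqpos : 0 < n / T := by omega
        have hqInt : ((n / T : Nat) : Int) ≠ 0 := Nat.cast_ne_zero.mpr hq
        rw [if_neg hqInt]
        set lo : List String := ps.drop (n / T * T) with hlo
        have hlolen : lo.length = n % T := by
          have hdm : n / T * T + n % T = n := by
            rw [Nat.mul_comm]; exact Nat.div_add_mod n T
          have hmul : n / T * T ≤ n := Nat.div_mul_le_self n T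
          simp only [hlo, List.length_drop]
          rw [← hn]
          omega
        have hlen1 : (F ++ [lo]).length > 1 := by
          rw [List.length_append, hFlen]
          simp only [List.length_cons, List.length_nil]
          omega
        rw [if_pos hlen1, PySem.List.pyGetD_neg_one_append_singleton]
        have hcond : ((lo.length : Int)) < ts := by
          rw [hlolen, ← hcast]
          exact_mod_cast Nat.mod_lt _ hTpos
        rw [if_pos hcond, List.dropLast_concat]
        have hslice : PySem.List.slice ps (some (((n / T : Nat) : Int) * ts)) none
            = lo := by
          have : ((n / T : Nat) : Int) * ts = ((n / T * T : Nat) : Int) := by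
            rw [← hcast]; push_cast; ring
          rw [this, PySem.List.slice_from_natCast]
        have := pvRedist_eq (n / T) hqpos lo 0 F hFlen
        rw [Nat.zero_mod] at this
        rw [this, hslice]
        norm_num


-- ===== VERDICT (by name: the statement is the Claim_ definition above) =====
theorem make_teams_spec : Claim_equal_make_teams := by
  intro participants team_size _
  exact main_eq participants team_size
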